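-- pv_equiv track=rewrite | github.com/AnnMertens/Project_Boontje | boontje/ngrams.py | adjective
-- ===== SOURCE A (Python) =====
-- def adjective(corpus):
--     """ count use of adjectives corpus"""
--     counter_adjective = 0
--
--     for sentence in corpus:
--         adj_found = False
--         previous_word_is_adj = False
--         previous_word = ""
--
--         for word, tag in sentence["tagged_alpino_words"]:
--             if previous_word_is_adj is True and tag == "noun":
--                 adj_found = True
--                 if adj_found is True:
--                     counter_adjective += 1
--             if tag == "adj":
--                 previous_word_is_adj = True
--                 previous_word = word
--             else:
--                 previous_word_is_adj = False
--
--     return counter_adjective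
-- ===== SOURCE B (Python) =====
-- def adjective(corpus):
--     """ count use of adjectives corpus"""
--     total = 0
--     for sentence in corpus:
--         tagged = sentence["tagged_alpino_words"]
--         adj_positions = {i for i, (_w, t) in enumerate(tagged) if t == "adj"}
--         total += sum(1 for i, (_w, t) in enumerate(tagged)
--                      if t == "noun" and i - 1 in adj_positions)
--     return total
-- ===== Notes on version B (the rewrite author's own statement) =====
-- stated objective: alternative
-- what changed: Replaces A's per-word previous_word_is_adj/adj_found flag state machine with two staged passes per sentence: first build a set of adjective positions from enumerate(), then count the nouns whose predecessor index is in that set.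
-- outside the precondition, e.g. on adjective([{'other_key': [('big', 'adj'), ('dog', 'noun')]}]): A raises KeyError, B raises KeyError
import Mathlib
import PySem

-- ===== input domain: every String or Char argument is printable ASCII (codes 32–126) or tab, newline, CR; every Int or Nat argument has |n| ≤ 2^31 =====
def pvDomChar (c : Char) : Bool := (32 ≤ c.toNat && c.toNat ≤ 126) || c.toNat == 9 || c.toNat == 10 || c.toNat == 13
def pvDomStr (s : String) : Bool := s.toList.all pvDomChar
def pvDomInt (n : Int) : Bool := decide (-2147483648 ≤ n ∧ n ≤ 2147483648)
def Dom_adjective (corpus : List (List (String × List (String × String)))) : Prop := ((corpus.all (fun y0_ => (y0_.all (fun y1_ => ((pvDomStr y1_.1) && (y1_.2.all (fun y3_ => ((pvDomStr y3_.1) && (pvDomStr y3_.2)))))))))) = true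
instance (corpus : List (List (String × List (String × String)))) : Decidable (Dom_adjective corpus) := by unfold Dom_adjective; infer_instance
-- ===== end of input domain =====

-- B replaces A's per-word flag state machine with two staged passes per sentence
-- (build the set of adjective positions, then count nouns whose predecessor index is in it); objective: alternative.
-- dict lookup sentence["tagged_alpino_words"]: first match in the association list
def pvLookupTagged (sentence : List (String × List (String × String))) : List (String × String) :=
  ((sentence.find? (fun p => p.1 == "tagged_alpino_words")).map (·.2)).getD []

-- ===== PORT A =====
-- inner-loop state: (adj_found, previous_word_is_adj, previous_word, counter_adjective)
def adjStepA (st : Bool × Bool × String × Int) (wt : String × String) : Bool × Bool × String × Int :=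
  let af := st.1; let p := st.2.1; let pw := st.2.2.1; let c := st.2.2.2
  let (af, c) :=
    if p && (wt.2 == "noun") then
      let af := true
      (af, if af then c + 1 else c)
    else (af, c)
  if wt.2 == "adj" then (af, true, wt.1, c) else (af, false, pw, c)

def adjective (corpus : List (List (String × List (String × String)))) : Int :=
  corpus.foldl
    (fun counter sentence =>
      ((pvLookupTagged sentence).foldl adjStepA (false, false, "", counter)).2.2.2)
    0

-- ===== PORT B =====
-- {i for i, (_w, t) in enumerate(tagged) if t == "adj"}
def adjPositionsB (ws : List (String × String)) : PySem.Set Int :=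
  PySem.Set.ofList
    ((PySem.List.enumerate ws).filterMap (fun p => if p.2.2 == "adj" then some p.1 else none))

-- sum(1 for i, (_w, t) in enumerate(tagged) if t == "noun" and i - 1 in adj_positions)
def nounAfterAdjB (ws : List (String × String)) : Int :=
  (((PySem.List.enumerate ws).countP
      (fun p => p.2.2 == "noun" && PySem.Set.contains (adjPositionsB ws) (p.1 - 1)) : Nat) : Int)

def adjective_alt (corpus : List (List (String × List (String × String)))) : Int :=
  corpus.foldl (fun total sentence => total + nounAfterAdjB (pvLookupTagged sentence)) 0

-- ===== PRECONDITION & SPEC =====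
-- Pre_ excludes corpora with a sentence dict missing the key "tagged_alpino_words", on which Python A (and B) raise KeyError.
def Pre_adjective (corpus : List (List (String × List (String × String)))) : Prop :=
  (corpus.all (fun s => (s.find? (fun p => p.1 == "tagged_alpino_words")).isSome)) = true
instance (corpus : List (List (String × List (String × String)))) : Decidable (Pre_adjective corpus) := by unfold Pre_adjective; infer_instance
def pvWitness_adjective : (List (List (String × List (String × String)))) :=
  [[("tagged_alpino_words", [("big", "adj"), ("dog", "noun")])]]

def Spec_adjective (corpus : List (List (String × List (String × String)))) (out : Int) : Prop := out = adjective_alt corpus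
instance (corpus : List (List (String × List (String × String)))) (out : Int) : Decidable (Spec_adjective corpus out) := by unfold Spec_adjective; infer_instance

-- ===== CLAIM (what is proved, stated in full; the proofs are below) =====
def Claim_equal_adjective : Prop := ∀ (corpus : List (List (String × List (String × String)))), Dom_adjective corpus → Pre_adjective corpus → Spec_adjective corpus (adjective corpus)

-- ===== LEMMAS AND PROOFS =====

-- common spec of both inner computations: pending "previous word was an adjective" flag
def gAdj : Bool → List (String × String) → Int
  | _, [] => 0
  | p, (_, t) :: r => (if p && (t == "noun") then 1 else 0) + gAdj (t == "adj") r

theorem adjStepA_loop (ws : List (String × String)) (af p : Bool) (pw : String) (c : Int) :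
    (ws.foldl adjStepA (af, p, pw, c)).2.2.2 = c + gAdj p ws := by
  induction ws generalizing af p pw c with
  | nil => simp [gAdj]
  | cons wt r ih =>
    obtain ⟨w, t⟩ := wt
    simp only [List.foldl_cons, adjStepA, gAdj]
    by_cases hp : p && (t == "noun") <;> by_cases ht : t == "adj" <;>
      simp [hp, ht, ih] <;> ring

-- membership in the adjective-position set: j is a nonnegative index whose tag is "adj"
theorem mem_adjPositionsB (ws : List (String × String)) (j : Int) :
    j ∈ adjPositionsB ws ↔ ∃ (n : Nat), ∃ (h : n < ws.length), j = (n : Int) ∧ ws[n].2 = "adj" := by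
  unfold adjPositionsB
  rw [PySem.Set.mem_ofList]
  simp only [List.mem_filterMap, PySem.List.mem_enumerate_iff]
  constructor
  · rintro ⟨p, ⟨n, hn, rfl⟩, hf⟩
    by_cases ht : ((0 + (n : Int), ws[n]).2.2 == "adj") = true
    · refine ⟨n, hn, ?_, by simpa using ht⟩
      rw [if_pos ht] at hf
      have := Option.some_inj.mp hf
      omega
    · rw [if_neg ht] at hf; exact absurd hf (by simp)
  · rintro ⟨n, hn, rfl, ht⟩
    exact ⟨(0 + (n : Int), ws[n]), ⟨n, hn, rfl⟩, by simp [ht]⟩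

-- B's counting pass equals gAdj, generalized over the start offset and the predecessor predicate
theorem countB_loop (ws : List (String × String)) (k : Int) (P : Int → Bool)
    (H : ∀ (n : Nat), ∀ (h : n < ws.length), P (k + n) = (ws[n].2 == "adj")) :
    (((PySem.List.enumerate ws k).countP (fun p => p.2.2 == "noun" && P (p.1 - 1)) : Nat) : Int)
      = gAdj (P (k - 1)) ws := by
  induction ws generalizing k with
  | nil => simp [gAdj]
  | cons wt r ih =>
    obtain ⟨w, t⟩ := wt
    rw [PySem.List.enumerate_cons]
    have hr := ih (k + 1) (fun n h => by
      have := H (n + 1) (by simpa using Nat.succ_lt_succ h)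
      simpa [add_assoc, add_comm, add_left_comm] using this)
    have hk1 : k + 1 - 1 = k := by ring
    rw [hk1] at hr
    have h0 : P k = (t == "adj") := by simpa using H 0 (by simp)
    simp only [List.countP_cons, gAdj]
    by_cases hc : ((t == "noun") && P (k - 1)) = true <;>
      · push_cast
        rw [hr, h0]
        rcases Bool.dichotomy (P (k - 1)) with h | h <;>
          rcases Bool.dichotomy (t == "noun") with h2 | h2 <;>
          simp_all <;> ring

theorem nounAfterAdjB_eq_gAdj (ws : List (String × String)) :
    nounAfterAdjB ws = gAdj false ws := by
  unfold nounAfterAdjB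
  have hP : ∀ (n : Nat), ∀ (h : n < ws.length),
      PySem.Set.contains (adjPositionsB ws) ((0 : Int) + n) = (ws[n].2 == "adj") := by
    intro n h
    by_cases ht : ws[n].2 = "adj"
    · have hm : ((n : Int)) ∈ adjPositionsB ws := by
        rw [mem_adjPositionsB]; exact ⟨n, h, rfl, ht⟩
      simp [hm, ht]
    · have hm : ((n : Int)) ∉ adjPositionsB ws := by
        rw [mem_adjPositionsB]
        rintro ⟨m, hm', he, ha⟩
        have : m = n := by omega
        exact ht (this ▸ ha)
      simp [hm, ht]
  have hmain := countB_loop ws 0 (fun j => PySem.Set.contains (adjPositionsB ws) j) hP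
  have hneg : ((-1 : Int)) ∉ adjPositionsB ws := by
    rw [mem_adjPositionsB]; rintro ⟨m, hm, he, _⟩; omega
  simp only [hmain]
  simp [hneg]

theorem adjective_foldl (corpus : List (List (String × List (String × String)))) (c : Int) :
    corpus.foldl
      (fun counter sentence =>
        ((pvLookupTagged sentence).foldl adjStepA (false, false, "", counter)).2.2.2) c =
    corpus.foldl (fun total sentence => total + nounAfterAdjB (pvLookupTagged sentence)) c := by
  induction corpus generalizing c with
  | nil => rfl
  | cons s r ih =>
    simp only [List.foldl_cons]
    rw [adjStepA_loop, nounAfterAdjB_eq_gAdj, ih]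

-- ===== VERDICT (by name: the statement is the Claim_ definition above) =====
theorem adjective_spec : Claim_equal_adjective := by
  intro corpus _ _
  show adjective corpus = adjective_alt corpus
  simpa [adjective, adjective_alt] using adjective_foldl corpus 0
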